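-- pv_equiv track=rewrite | github.com/aleveren/ucsd-research | simple-hier-topic-model/simple_hierarchical_topic_model.py | _explore_branching_factors
-- ===== SOURCE A (Python) =====
-- def _explore_branching_factors(factors, prefix):
--     yield prefix
--     if len(factors) > 0:
--         first = factors[0]
--         rest = factors[1:]
--         for i in range(first):
--             new_prefix = prefix + (i,)
--             for path in _explore_branching_factors(rest, new_prefix):
--                 yield path
-- ===== SOURCE B (Python) =====
-- def _explore_branching_factors(factors, prefix):
--     # Iterative DFS with an explicit stack instead of recursive generators.
--     stack = [(tuple(factors), prefix)]
--     while stack: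
--         fs, pre = stack.pop()
--         yield pre
--         if len(fs) > 0:
--             first = fs[0]
--             rest = fs[1:]
--             for i in reversed(range(first)):
--                 stack.append((rest, pre + (i,)))
-- ===== Notes on version B (the rewrite author's own statement) =====
-- stated objective: alternative
-- what changed: Replaced the recursive nested-generator traversal by an iterative DFS over an explicit LIFO stack of (factors, prefix) frames, pushing children in reversed index order to preserve the exact pre-order yield sequence.
import Mathlib
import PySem

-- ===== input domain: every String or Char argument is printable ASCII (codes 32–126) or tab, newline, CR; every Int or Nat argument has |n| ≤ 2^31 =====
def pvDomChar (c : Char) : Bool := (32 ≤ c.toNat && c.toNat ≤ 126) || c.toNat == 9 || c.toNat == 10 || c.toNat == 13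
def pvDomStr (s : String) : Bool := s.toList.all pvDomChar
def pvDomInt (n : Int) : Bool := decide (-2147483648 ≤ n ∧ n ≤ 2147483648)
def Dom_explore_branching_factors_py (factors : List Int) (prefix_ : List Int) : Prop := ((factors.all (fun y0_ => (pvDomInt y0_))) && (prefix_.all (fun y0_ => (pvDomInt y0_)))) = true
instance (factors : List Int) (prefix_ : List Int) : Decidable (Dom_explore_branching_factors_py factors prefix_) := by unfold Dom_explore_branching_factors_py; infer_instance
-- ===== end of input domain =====

-- B replaces the recursive nested-generator pre-order traversal by an iterative DFS over an
-- explicit stack of (factors, prefix) frames (children pushed in reversed order); same output.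

-- ===== PORT A =====
-- Literal port of A: yield prefix, then for i in range(factors[0]) recurse on factors[1:],
-- appending the yielded paths in loop order.
def explore_branching_factors_py (factors : List Int) (prefix_ : List Int) : List (List Int) :=
  match factors with
  | [] => [prefix_]
  | first :: rest =>
    (PySem.List.pyRange 0 first 1).foldl
      (fun acc i => acc ++ explore_branching_factors_py rest (prefix_ ++ [i])) [prefix_]

-- ===== PORT B =====
-- tree-size measure used only for termination of the stack loop
def pvWeight : List Int → Nat
  | [] => 1
  | f :: rest => 1 + (PySem.List.pyRange 0 f 1).length * pvWeight rest

def pvMSum (stack : List (List Int × List Int)) : Nat :=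
  (stack.map (fun fp => pvWeight fp.1)).sum

-- 'for i in reversed(l): stack.append(g(i))' on a head-is-top stack equals prepending l.map g
theorem pvFoldl_reverse_cons {α β : Type} (l : List β) (g : β → α) (stk : List α) :
    l.reverse.foldl (fun st i => g i :: st) stk = l.map g ++ stk := by
  induction l generalizing stk with
  | nil => simp
  | cons a t ih => simp [List.foldl_append, ih]

-- the while loop of B: pop a frame, emit its prefix, push the children (reversed) if any
def pvStackRun : List (List Int × List Int) → List (List Int)
  | [] => []
  | (fs, pre) :: stk =>
    match fs with
    | [] => pre :: pvStackRun stk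
    | first :: rest =>
      pre :: pvStackRun ((PySem.List.pyRange 0 first 1).reverse.foldl
        (fun st i => (rest, pre ++ [i]) :: st) stk)
termination_by s => pvMSum s
decreasing_by
  · simp [pvMSum, pvWeight]
  · rw [pvFoldl_reverse_cons]
    simp only [pvMSum, pvWeight, List.map_map, List.map_append, List.sum_append, List.map_cons, List.sum_cons,
      Function.comp_def, List.map_const', List.sum_replicate, smul_eq_mul,
      PySem.List.length_pyRange_one]
    omega

def explore_branching_factors_py_alt (factors : List Int) (prefix_ : List Int) : List (List Int) :=
  pvStackRun [(factors, prefix_)]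

-- ===== PRECONDITION & SPEC =====
def Spec_explore_branching_factors_py (factors : List Int) (prefix_ : List Int) (out : List (List Int)) : Prop := out = explore_branching_factors_py_alt factors prefix_
instance (factors : List Int) (prefix_ : List Int) (out : List (List Int)) : Decidable (Spec_explore_branching_factors_py factors prefix_ out) := by unfold Spec_explore_branching_factors_py; infer_instance

-- ===== CLAIM (what is proved, stated in full; the proofs are below) =====
def Claim_equal_explore_branching_factors_py : Prop := ∀ (factors : List Int) (prefix_ : List Int), Dom_explore_branching_factors_py factors prefix_ → Spec_explore_branching_factors_py factors prefix_ (explore_branching_factors_py factors prefix_)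

-- ===== LEMMAS AND PROOFS =====

theorem exploreA_cons (first : Int) (rest : List Int) (prefix_ : List Int) :
    explore_branching_factors_py (first :: rest) prefix_ =
      prefix_ :: (PySem.List.pyRange 0 first 1).flatMap
        (fun i => explore_branching_factors_py rest (prefix_ ++ [i])) := by
  show (PySem.List.pyRange 0 first 1).foldl
      (fun acc i => acc ++ explore_branching_factors_py rest (prefix_ ++ [i])) [prefix_] = _
  rw [PySem.List.foldl_append_eq_flatMap]
  rfl

theorem pvStackRun_eq (stack : List (List Int × List Int)) :
    pvStackRun stack = stack.flatMap (fun fp => explore_branching_factors_py fp.1 fp.2) := by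
  induction stack using pvStackRun.induct with
  | case1 => simp [pvStackRun]
  | case2 pre stk ih =>
      simp [pvStackRun, ih, explore_branching_factors_py]
  | case3 pre stk first rest ih =>
      rw [pvStackRun, ih, pvFoldl_reverse_cons]
      simp [exploreA_cons, List.flatMap_append, List.flatMap_map]

-- ===== VERDICT (by name: the statement is the Claim_ definition above) =====
theorem explore_branching_factors_py_spec : Claim_equal_explore_branching_factors_py := by
  intro factors prefix_ _
  unfold Spec_explore_branching_factors_py explore_branching_factors_py_alt
  rw [pvStackRun_eq]
  simp
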